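-- pv_equiv track=rewrite | github.com/moevm/dataset_pr-cs | CS_dataset/autumn/cs-2023-3384/Karbovskii_Daniil_lb2/src/main.py | check_sqr
-- ===== SOURCE A (Python) =====
-- def check_sqr(x, pixel, sqr, max_sqr, n, ans, xy):
--     for y in range(len(pixel[x])):
--         if n <= pixel[x][y]:
--             sqr += n
--         if y == len(pixel[x]) - 1 or pixel[x][y + 1] < n:
--             if max_sqr < sqr:
--                 max_sqr = sqr
--                 xy = (y - max_sqr // n + 1, x - n + 1, y, x)
--                 if max_sqr == ans:
--                     return True, max_sqr, sqr, xy
--             sqr = 0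
--     return False, max_sqr, sqr, xy
-- ===== SOURCE B (Python) =====
-- def check_sqr(x, pixel, sqr, max_sqr, n, ans, xy):
--     row = pixel[x]
--     # pass 1: one walk of the row, collecting (segment_end_y, segment_sum)
--     segments = []
--     acc = sqr
--     for y, p in enumerate(row):
--         if p >= n:
--             acc += n
--         if y == len(row) - 1 or row[y + 1] < n:
--             segments.append((y, acc))
--             acc = 0
--     # pass 2: scan the segment list tracking the maximum
--     for end_y, s in segments:
--         if s > max_sqr:
--             max_sqr = s
--             xy = (end_y - max_sqr // n + 1, x - n + 1, end_y, x)
--             if max_sqr == ans: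
--                 return True, max_sqr, s, xy
--     return False, max_sqr, acc, xy
-- ===== Notes on version B (the rewrite author's own statement) =====
-- stated objective: alternative
-- what changed: Splits A's single interleaved loop into two passes: a first walk of the row builds an explicit list of (segment_end, segment_sum) pairs, and a second scan of that list does all max-tracking, early-exit and coordinate computation; the leftover accumulator supplies the normal-exit sqr value. Pre_ excludes only inputs where both programs raise (x out of range; n == 0 with a segment sum exceeding max_sqr).
import Mathlib
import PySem

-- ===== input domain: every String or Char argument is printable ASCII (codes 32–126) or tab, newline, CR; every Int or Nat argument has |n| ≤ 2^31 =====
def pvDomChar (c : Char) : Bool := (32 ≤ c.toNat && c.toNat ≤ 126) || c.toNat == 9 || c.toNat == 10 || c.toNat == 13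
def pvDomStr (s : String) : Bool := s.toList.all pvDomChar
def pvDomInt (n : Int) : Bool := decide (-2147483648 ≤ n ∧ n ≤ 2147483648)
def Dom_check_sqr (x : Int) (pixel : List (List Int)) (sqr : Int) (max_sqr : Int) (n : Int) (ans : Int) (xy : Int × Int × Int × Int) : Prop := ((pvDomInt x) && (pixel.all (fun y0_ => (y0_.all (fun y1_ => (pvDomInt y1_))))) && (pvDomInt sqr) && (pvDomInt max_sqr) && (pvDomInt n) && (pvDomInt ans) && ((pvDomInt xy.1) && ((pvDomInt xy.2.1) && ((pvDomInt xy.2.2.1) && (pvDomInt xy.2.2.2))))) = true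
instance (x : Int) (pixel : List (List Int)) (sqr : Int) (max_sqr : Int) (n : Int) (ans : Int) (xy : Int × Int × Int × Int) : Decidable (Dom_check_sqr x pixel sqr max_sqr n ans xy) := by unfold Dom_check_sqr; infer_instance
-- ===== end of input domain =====

-- ===== PORT A =====
-- B restructures A's single interleaved loop into two passes (segment list, then scan); same cost, stated as 'alternative'.
-- A-side loop: y over range(len(row)), accumulating sqr, checking boundaries, with early return.
def csLoopA (x n ans : Int) (row : List Int) (y : Nat) (sqr max_sqr : Int) (xy : Int × Int × Int × Int) : Bool × Int × Int × (Int × Int × Int × Int) :=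
  if h : y < row.length then
    let sqr1 := if n ≤ row[y] then sqr + n else sqr
    if y = row.length - 1 ∨ row.getD (y + 1) 0 < n then
      if max_sqr < sqr1 then
        let xy2 : Int × Int × Int × Int := ((y : Int) - PySem.Int.floordiv sqr1 n + 1, x - n + 1, (y : Int), x)
        if sqr1 = ans then (true, sqr1, sqr1, xy2)
        else csLoopA x n ans row (y + 1) 0 sqr1 xy2
      else csLoopA x n ans row (y + 1) 0 max_sqr xy
    else csLoopA x n ans row (y + 1) sqr1 max_sqr xy
  else (false, max_sqr, sqr, xy)
termination_by row.length - y

def check_sqr (x : Int) (pixel : List (List Int)) (sqr : Int) (max_sqr : Int) (n : Int) (ans : Int) (xy : Int × Int × Int × Int) : Bool × Int × Int × (Int × Int × Int × Int) :=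
  match PySem.List.pyGet? pixel x with
  | some row => csLoopA x n ans row 0 sqr max_sqr xy
  | none => (false, max_sqr, sqr, xy)  -- Python raises IndexError here; excluded by Pre_

-- ===== PORT B =====
-- pass 1: walk the row once, building the list of (segment_end_y, segment_sum); also returns the leftover accumulator.
def csSegs (n : Int) (row : List Int) (y : Nat) (acc : Int) : List (Nat × Int) × Int :=
  if h : y < row.length then
    let acc1 := if n ≤ row[y] then acc + n else acc
    if y = row.length - 1 ∨ row.getD (y + 1) 0 < n then
      let r := csSegs n row (y + 1) 0
      ((y, acc1) :: r.1, r.2)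
    else csSegs n row (y + 1) acc1
  else ([], acc)
termination_by row.length - y

-- pass 2: scan the segment list tracking the maximum.
def csScan (x n ans : Int) : List (Nat × Int) → Int → Int → (Int × Int × Int × Int) → Bool × Int × Int × (Int × Int × Int × Int)
  | [], rem, max_sqr, xy => (false, max_sqr, rem, xy)
  | (ey, s) :: rest, rem, max_sqr, xy =>
    if max_sqr < s then
      let xy2 : Int × Int × Int × Int := ((ey : Int) - PySem.Int.floordiv s n + 1, x - n + 1, (ey : Int), x)
      if s = ans then (true, s, s, xy2)
      else csScan x n ans rest rem s xy2
    else csScan x n ans rest rem max_sqr xy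

def check_sqr_alt (x : Int) (pixel : List (List Int)) (sqr : Int) (max_sqr : Int) (n : Int) (ans : Int) (xy : Int × Int × Int × Int) : Bool × Int × Int × (Int × Int × Int × Int) :=
  match PySem.List.pyGet? pixel x with
  | some row =>
    let sr := csSegs n row 0 sqr
    csScan x n ans sr.1 sr.2 max_sqr xy
  | none => (false, max_sqr, sqr, xy)  -- row = pixel[x] raises IndexError here; excluded by Pre_

-- ===== PRECONDITION & SPEC =====
-- Pre_ excludes exactly the inputs where Python A raises (B raises the very same exceptions there):
-- x out of range for pixel (IndexError), and n = 0 with a boundary where the accumulated sum exceeds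
-- max_sqr (ZeroDivisionError): with n = 0 the first segment sum is sqr and all later ones are 0, a later
-- boundary existing only when some pixel after the first is negative.
def Pre_check_sqr (x : Int) (pixel : List (List Int)) (sqr : Int) (max_sqr : Int) (n : Int) (ans : Int) (xy : Int × Int × Int × Int) : Prop :=
  PySem.Raise.InRange pixel.length x ∧
  (n ≠ 0 ∨ PySem.List.pyGetD pixel x [] = [] ∨
    (sqr ≤ max_sqr ∧ (0 ≤ max_sqr ∨ ∀ p ∈ (PySem.List.pyGetD pixel x []).tail, 0 ≤ p)))
instance (x : Int) (pixel : List (List Int)) (sqr : Int) (max_sqr : Int) (n : Int) (ans : Int) (xy : Int × Int × Int × Int) : Decidable (Pre_check_sqr x pixel sqr max_sqr n ans xy) := by unfold Pre_check_sqr; infer_instance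

def pvWitness_check_sqr : Int × List (List Int) × Int × Int × Int × Int × (Int × Int × Int × Int) := (0, [[1, 0, 1]], 0, 0, 1, 5, (0, 0, 0, 0))

def Spec_check_sqr (x : Int) (pixel : List (List Int)) (sqr : Int) (max_sqr : Int) (n : Int) (ans : Int) (xy : Int × Int × Int × Int) (out : Bool × Int × Int × (Int × Int × Int × Int)) : Prop := out = check_sqr_alt x pixel sqr max_sqr n ans xy
instance (x : Int) (pixel : List (List Int)) (sqr : Int) (max_sqr : Int) (n : Int) (ans : Int) (xy : Int × Int × Int × Int) (out : Bool × Int × Int × (Int × Int × Int × Int)) : Decidable (Spec_check_sqr x pixel sqr max_sqr n ans xy out) := by unfold Spec_check_sqr; infer_instance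

-- ===== CLAIM (what is proved, stated in full; the proofs are below) =====
def Claim_equal_check_sqr : Prop := ∀ (x : Int) (pixel : List (List Int)) (sqr : Int) (max_sqr : Int) (n : Int) (ans : Int) (xy : Int × Int × Int × Int), Dom_check_sqr x pixel sqr max_sqr n ans xy → Pre_check_sqr x pixel sqr max_sqr n ans xy → Spec_check_sqr x pixel sqr max_sqr n ans xy (check_sqr x pixel sqr max_sqr n ans xy)

-- ===== LEMMAS AND PROOFS =====
-- The interleaved loop equals pass 1 followed by pass 2, for any suffix of the row.
lemma csLoopA_eq_scan_segs (x n ans : Int) (row : List Int) :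
    ∀ (k y : Nat), row.length - y = k → ∀ (sqr max_sqr : Int) (xy : Int × Int × Int × Int),
      csLoopA x n ans row y sqr max_sqr xy =
        csScan x n ans (csSegs n row y sqr).1 (csSegs n row y sqr).2 max_sqr xy := by
  intro k
  induction k with
  | zero =>
    intro y hy sqr max_sqr xy
    rw [csLoopA, csSegs]
    rw [dif_neg (by omega), dif_neg (by omega)]
    rfl
  | succ k ih =>
    intro y hy sqr max_sqr xy
    have h : y < row.length := by omega
    rw [csLoopA, csSegs]
    rw [dif_pos h, dif_pos h]
    simp only
    by_cases hb : y = row.length - 1 ∨ row.getD (y + 1) 0 < n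
    · rw [if_pos hb, if_pos hb]
      simp only [csScan]
      by_cases hm : max_sqr < (if n ≤ row[y] then sqr + n else sqr)
      · rw [if_pos hm, if_pos hm]
        by_cases he : (if n ≤ row[y] then sqr + n else sqr) = ans
        · rw [if_pos he, if_pos he]
        · rw [if_neg he, if_neg he, ih (y + 1) (by omega)]
      · rw [if_neg hm, if_neg hm, ih (y + 1) (by omega)]
    · rw [if_neg hb, if_neg hb]
      exact ih (y + 1) (by omega) _ _ _

-- ===== VERDICT (by name: the statement is the Claim_ definition above) =====
theorem check_sqr_spec : Claim_equal_check_sqr := by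
  intro x pixel sqr max_sqr n ans xy _ _
  unfold Spec_check_sqr check_sqr check_sqr_alt
  cases hrow : PySem.List.pyGet? pixel x with
  | none => rfl
  | some row => exact csLoopA_eq_scan_segs x n ans row (row.length - 0) 0 rfl sqr max_sqr xy
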